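-- pv_equiv track=rewrite | github.com/012090120901209/AHKv2_Finetune | scripts/format_ahk_examples.py | find_header_end
-- ===== SOURCE A (Python) =====
-- def find_header_end(lines: list[str]) -> int:
--     """Heuristic: header ends at first non-comment, non-directive code line."""
--     in_block_comment = False
--     for idx, line in enumerate(lines):
--         stripped = line.lstrip()
--         if in_block_comment:
--             if "*/" in stripped:
--                 in_block_comment = False
--             continue
--         if not stripped:
--             continue
--         if stripped.startswith(";"):
--             continue
--         if stripped.startswith("/*"):
--             in_block_comment = True
--             continue
--         if stripped.startswith("#"):
--             continue
--         return idx
--     return len(lines)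
-- ===== SOURCE B (Python) =====
-- def find_header_end(lines: list[str]) -> int:
--     """Heuristic: header ends at first non-comment, non-directive code line."""
--     n = len(lines)
--     # Phase 1: greedily pair each top-level '/*' opener with the next line
--     # containing '*/', producing closed index ranges (unterminated -> up to n).
--     regions = []
--     i = 0
--     while i < n:
--         if lines[i].lstrip().startswith("/*"):
--             j = i + 1
--             while j < n and "*/" not in lines[j]:
--                 j += 1
--             regions.append((i, j))
--             i = j + 1
--         else:
--             i += 1
--     # Phase 2: first index holding a code line not covered by any comment region.
--     for idx, line in enumerate(lines):
--         s = line.lstrip()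
--         if (s and not s.startswith(";") and not s.startswith("#")
--                 and not s.startswith("/*")
--                 and not any(a <= idx <= b for a, b in regions)):
--             return idx
--     return n
-- ===== Notes on version B (the rewrite author's own statement) =====
-- stated objective: alternative
-- what changed: Replaces A's single pass carrying an in_block_comment flag by two staged passes: first precompute the list of block-comment index regions (each '/*' opener paired with its closing '*/' line), then search for the first code-shaped line not covered by any region.
import Mathlib
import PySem

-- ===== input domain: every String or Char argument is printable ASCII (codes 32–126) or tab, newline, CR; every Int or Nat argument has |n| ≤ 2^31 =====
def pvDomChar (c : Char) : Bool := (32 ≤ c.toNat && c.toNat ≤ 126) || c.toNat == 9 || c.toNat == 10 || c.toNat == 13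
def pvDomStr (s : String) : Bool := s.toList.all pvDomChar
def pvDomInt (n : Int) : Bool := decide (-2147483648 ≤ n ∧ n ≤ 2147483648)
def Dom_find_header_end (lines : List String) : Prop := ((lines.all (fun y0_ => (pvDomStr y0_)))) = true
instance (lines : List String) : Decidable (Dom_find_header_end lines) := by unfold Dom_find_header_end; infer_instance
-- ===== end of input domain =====

-- B replaces A's single pass with a carried in_block_comment flag by two staged
-- passes: precompute the block-comment index regions, then search for the first
-- code-shaped line not covered by any region (alternative decomposition).

-- ===== PORT A =====
-- A's for-loop over enumerate(lines) carrying the in_block_comment flag; falling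
-- off the end of the list is Python's `return len(lines)` (n is passed in).
def findHeaderEndGoA (n : Int) : List String → Int → Bool → Int
  | [], _, _ => n
  | l :: rest, idx, flag =>
    let s := PySem.Str.lstrip l
    if flag then
      if PySem.Str.isIn "*/" s then findHeaderEndGoA n rest (idx + 1) false
      else findHeaderEndGoA n rest (idx + 1) true
    else if s = "" then findHeaderEndGoA n rest (idx + 1) false
    else if PySem.Str.startswith s ";" then findHeaderEndGoA n rest (idx + 1) false
    else if PySem.Str.startswith s "/*" then findHeaderEndGoA n rest (idx + 1) true
    else if PySem.Str.startswith s "#" then findHeaderEndGoA n rest (idx + 1) false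
    else idx

def find_header_end (lines : List String) : Int :=
  findHeaderEndGoA (lines.length : Int) lines 0 false

-- ===== PORT B =====
-- B's inner while loop of phase 1: scan for the first line whose raw text
-- contains "*/"; none = ran off the end (j hit n); some (r, j) = the lines after
-- that closing line together with the closing line's index j.
def fheSkip : List String → Int → Option (List String × Int)
  | [], _ => none
  | l :: rest, j =>
    if PySem.Str.isIn "*/" l then some (rest, j)
    else fheSkip rest (j + 1)

-- termination measure for the phase-1 recursion below
theorem fheSkip_length {xs : List String} {j : Int} {r : List String} {j' : Int}
    (h : fheSkip xs j = some (r, j')) : r.length < xs.length := by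
  induction xs generalizing j with
  | nil => simp [fheSkip] at h
  | cons l rest ih =>
    simp only [fheSkip] at h
    split at h
    · cases h; simp
    · exact Nat.lt_trans (ih h) (by simp)

-- Phase 1 (Source B's first while loop): greedily pair each top-level '/*' opener
-- with the next '*/' line into closed index regions; unterminated -> (i, n).
def fheRegions (n : Int) : List String → Int → List (Int × Int)
  | [], _ => []
  | l :: rest, i =>
    if PySem.Str.startswith (PySem.Str.lstrip l) "/*" then
      match h : fheSkip rest (i + 1) with
      | none => [(i, n)]
      | some (r, j) => (i, j) :: fheRegions n r (j + 1)
    else fheRegions n rest (i + 1)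
  termination_by xs => xs.length
  decreasing_by
  · exact Nat.lt_trans (fheSkip_length h) (by simp)
  · simp

-- Source B's `any(a <= idx <= b for a, b in regions)`
def fheCovered (regs : List (Int × Int)) (idx : Int) : Bool :=
  regs.any (fun p => decide (p.1 ≤ idx) && decide (idx ≤ p.2))

-- Phase 2 (Source B's for loop): first index of a code-shaped line not covered by
-- any region; falling off the end is `return n`.
def fheSearch (n : Int) (regs : List (Int × Int)) : List String → Int → Int
  | [], _ => n
  | l :: rest, idx =>
    let s := PySem.Str.lstrip l
    if s ≠ "" ∧ PySem.Str.startswith s ";" = false ∧ PySem.Str.startswith s "#" = false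
        ∧ PySem.Str.startswith s "/*" = false ∧ fheCovered regs idx = false then idx
    else fheSearch n regs rest (idx + 1)

def find_header_end_alt (lines : List String) : Int :=
  fheSearch (lines.length : Int) (fheRegions (lines.length : Int) lines 0) lines 0

-- ===== PRECONDITION & SPEC =====
def Spec_find_header_end (lines : List String) (out : Int) : Prop := out = find_header_end_alt lines
instance (lines : List String) (out : Int) : Decidable (Spec_find_header_end lines out) := by unfold Spec_find_header_end; infer_instance

-- ===== CLAIM (what is proved, stated in full; the proofs are below) =====
def Claim_equal_find_header_end : Prop := ∀ (lines : List String), Dom_find_header_end lines → Spec_find_header_end lines (find_header_end lines)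

-- ===== LEMMAS AND PROOFS =====

-- intermediate machine: A's loop with the '/*' branch expressed through fheSkip
def fheGoB (n : Int) : List String → Int → Int
  | [], _ => n
  | l :: rest, idx =>
    let s := PySem.Str.lstrip l
    if s = "" then fheGoB n rest (idx + 1)
    else if PySem.Str.startswith s ";" then fheGoB n rest (idx + 1)
    else if PySem.Str.startswith s "/*" then
      match h : fheSkip rest (idx + 1) with
      | none => n
      | some (r, j) => fheGoB n r (j + 1)
    else if PySem.Str.startswith s "#" then fheGoB n rest (idx + 1)
    else idx
  termination_by xs => xs.length
  decreasing_by
  all_goals first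
  | exact Nat.lt_trans (fheSkip_length h) (by simp)
  | simp

-- '*/' starts with '*', which lstrip never removes, so it occurs in lstrip l iff in l.
theorem infix_dropWhile_isspace_iff (cs : List Char) :
    ['*', '/'] <:+: List.dropWhile PySem.Chars.isspace cs ↔ ['*', '/'] <:+: cs := by
  induction cs with
  | nil => simp
  | cons c cs ih =>
    by_cases hc : PySem.Chars.isspace c
    · rw [List.dropWhile_cons_of_pos hc, ih, List.infix_cons_iff]
      constructor
      · exact Or.inr
      · rintro (⟨t, ht⟩ | hi)
        · exfalso
          have hce : c = '*' := by
            have := ht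
            simp only [List.cons_append] at this
            exact (List.cons.injEq _ _ _ _ ▸ this).1.symm
          rw [hce] at hc
          exact absurd hc (by decide)
        · exact hi
    · rw [List.dropWhile_cons_of_neg hc]

theorem isIn_lstrip (l : String) :
    PySem.Str.isIn "*/" (PySem.Str.lstrip l) = PySem.Str.isIn "*/" l := by
  have hsub : ("*/" : String).toList = ['*', '/'] := rfl
  by_cases h : PySem.Str.isIn "*/" l = true
  · rw [h, PySem.Str.isIn_iff_infix, PySem.Str.toList_lstrip, PySem.Chars.lstrip, hsub,
      infix_dropWhile_isspace_iff]
    rw [PySem.Str.isIn_iff_infix, hsub] at h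
    exact h
  · rw [Bool.not_eq_true] at h
    rw [h, ← Bool.not_eq_true, PySem.Str.isIn_iff_infix, PySem.Str.toList_lstrip,
      PySem.Chars.lstrip, hsub, infix_dropWhile_isspace_iff]
    rw [← Bool.not_eq_true, PySem.Str.isIn_iff_infix, hsub] at h
    exact h

-- A string starting with ";" does not start with "/*".
theorem startswith_semi_not_slashstar (s : String)
    (h : PySem.Str.startswith s ";" = true) : PySem.Str.startswith s "/*" = false := by
  rw [PySem.Str.startswith_eq] at h ⊢
  rw [PySem.Chars.startswith_iff] at h
  rw [← Bool.not_eq_true, PySem.Chars.startswith_iff]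
  intro hp
  obtain ⟨t, ht⟩ := h
  obtain ⟨u, hu⟩ := hp
  have : (';' : Char) = '/' := by
    have h1 : s.toList = ';' :: t := by simpa using ht.symm
    have h2 : s.toList = '/' :: '*' :: u := by simpa using hu.symm
    rw [h1] at h2
    exact (List.cons.injEq _ _ _ _ ▸ h2).1
  exact absurd this (by decide)

-- A's run with the flag set equals the inner scan followed by the resumed loop.
theorem goA_true_eq_skip (n : Int) (xs : List String) (idx : Int)
    (hGo : ∀ ys i, ys.length < xs.length →
      findHeaderEndGoA n ys i false = fheGoB n ys i) :
    findHeaderEndGoA n xs idx true =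
      (match fheSkip xs idx with
       | none => n
       | some (r, j) => fheGoB n r (j + 1)) := by
  induction xs generalizing idx with
  | nil => simp [findHeaderEndGoA, fheSkip]
  | cons l rest ih =>
    by_cases hin : PySem.Str.isIn "*/" l = true
    · have hin' : PySem.Str.isIn "*/" (PySem.Str.lstrip l) = true := by
        rw [isIn_lstrip]; exact hin
      simp only [findHeaderEndGoA, fheSkip, hin, hin', if_true]
      exact hGo rest (idx + 1) (by simp)
    · rw [Bool.not_eq_true] at hin
      have hin' : PySem.Str.isIn "*/" (PySem.Str.lstrip l) = false := by
        rw [isIn_lstrip]; exact hin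
      simp only [findHeaderEndGoA, fheSkip, hin, hin', Bool.false_eq_true, if_false]
      exact ih (idx + 1) (fun ys i h => hGo ys i (Nat.lt_trans h (by simp)))

-- A's loop equals the intermediate machine.
theorem goA_eq_goB (n : Int) (k : Nat) (xs : List String) (hk : xs.length = k)
    (idx : Int) : findHeaderEndGoA n xs idx false = fheGoB n xs idx := by
  induction k using Nat.strong_induction_on generalizing xs idx with
  | _ k ih =>
    match xs, hk with
    | [], _ => simp [findHeaderEndGoA, fheGoB]
    | l :: rest, hk =>
      have hrest : rest.length < k := by simp at hk; omega
      by_cases h1 : PySem.Str.lstrip l = ""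
      · simp only [findHeaderEndGoA, fheGoB, h1, if_true, Bool.false_eq_true, if_false]
        exact ih rest.length hrest rest rfl (idx + 1)
      · by_cases h2 : PySem.Str.startswith (PySem.Str.lstrip l) ";" = true
        · simp only [findHeaderEndGoA, fheGoB, h1, h2, if_true, Bool.false_eq_true, if_false]
          exact ih rest.length hrest rest rfl (idx + 1)
        · rw [Bool.not_eq_true] at h2
          by_cases h3 : PySem.Str.startswith (PySem.Str.lstrip l) "/*" = true
          · simp only [findHeaderEndGoA, fheGoB, h1, h2, h3, if_true, Bool.false_eq_true, if_false]
            rw [goA_true_eq_skip n rest (idx + 1)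
              (fun ys i h => ih ys.length (Nat.lt_trans h hrest) ys rfl i)]
            rcases hsk : fheSkip rest (idx + 1) with _ | ⟨r, j⟩ <;> rfl
          · rw [Bool.not_eq_true] at h3
            by_cases h4 : PySem.Str.startswith (PySem.Str.lstrip l) "#" = true
            · simp only [findHeaderEndGoA, fheGoB, h1, h2, h3, h4, if_true,
                Bool.false_eq_true, if_false]
              exact ih rest.length hrest rest rfl (idx + 1)
            · rw [Bool.not_eq_true] at h4
              simp only [findHeaderEndGoA, fheGoB, h1, h2, h3, h4, Bool.false_eq_true, if_false]

-- basic facts about the inner scan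
theorem fheSkip_ge {xs : List String} {j0 j : Int} {r : List String}
    (h : fheSkip xs j0 = some (r, j)) : j0 ≤ j := by
  induction xs generalizing j0 with
  | nil => simp [fheSkip] at h
  | cons l rest ih =>
    simp only [fheSkip] at h
    split at h
    · cases h; omega
    · have := ih h; omega

theorem fheSkip_len_eq {xs : List String} {j0 j : Int} {r : List String}
    (h : fheSkip xs j0 = some (r, j)) : j0 + (xs.length : Int) = j + 1 + (r.length : Int) := by
  induction xs generalizing j0 with
  | nil => simp [fheSkip] at h
  | cons l rest ih =>
    simp only [fheSkip] at h
    split at h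
    · cases h; simp; omega
    · have := ih h; simp at this ⊢; omega

-- every region produced from index i starts at or after i
theorem fheRegions_lb (n : Int) (k : Nat) (xs : List String) (hk : xs.length = k)
    (i : Int) : ∀ p ∈ fheRegions n xs i, i ≤ p.1 := by
  induction k using Nat.strong_induction_on generalizing xs i with
  | _ k ih =>
    match xs, hk with
    | [], _ => simp [fheRegions]
    | l :: rest, hk =>
      have hrest : rest.length < k := by simp at hk; omega
      by_cases h1 : PySem.Str.startswith (PySem.Str.lstrip l) "/*" = true
      · rw [fheRegions, if_pos h1]
        split
        · simp
        · rename_i r j hskip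
          intro p hp
          rcases List.mem_cons.mp hp with h | h
          · subst h; simp
          · have hj := fheSkip_ge hskip
            have hlen := fheSkip_length hskip
            have := ih r.length (Nat.lt_trans hlen hrest) r rfl (j + 1) p h
            omega
      · rw [Bool.not_eq_true] at h1
        rw [fheRegions, if_neg (by simpa using h1)]
        intro p hp
        have := ih rest.length hrest rest rfl (i + 1) p hp
        omega

-- if one region covers every remaining index, the search falls off the end
theorem fheSearch_all_covered (n : Int) (regs : List (Int × Int)) (a b : Int)
    (hmem : (a, b) ∈ regs) : ∀ (xs : List String) (i : Int), a ≤ i →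
    i + (xs.length : Int) ≤ b + 1 → fheSearch n regs xs i = n := by
  intro xs
  induction xs with
  | nil => intro i _ _; rfl
  | cons l rest ih =>
    intro i hai hib
    have hcov : fheCovered regs i = true := by
      simp only [fheCovered, List.any_eq_true]
      exact ⟨(a, b), hmem, by simp at hib ⊢; omega⟩
    rw [fheSearch, if_neg (fun hc => by rw [hcov] at hc; simp at hc)]
    exact ih (i + 1) (by omega) (by simp at hib ⊢; omega)

-- the search walks over a region's lines without stopping
theorem fheSearch_skip (n : Int) (regs : List (Int × Int)) (a b : Int)
    (hmem : (a, b) ∈ regs) : ∀ (ys : List String) (i : Int) (r : List String) (j : Int),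
    fheSkip ys i = some (r, j) → a ≤ i - 1 → j ≤ b →
    fheSearch n regs ys i = fheSearch n regs r (j + 1) := by
  intro ys
  induction ys with
  | nil => intro i r j h; simp [fheSkip] at h
  | cons l rest ih =>
    intro i r j hsk hai hjb
    have hij : i ≤ j := by
      simp only [fheSkip] at hsk
      split at hsk
      · cases hsk; omega
      · have := fheSkip_ge hsk; omega
    have hcov : fheCovered regs i = true := by
      simp only [fheCovered, List.any_eq_true]
      exact ⟨(a, b), hmem, by simp; omega⟩
    rw [fheSearch, if_neg (fun hc => by rw [hcov] at hc; simp at hc)]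
    simp only [fheSkip] at hsk
    split at hsk
    · cases hsk; rfl
    · exact ih (i + 1) r j hsk (by omega) hjb

-- main lemma: the intermediate machine equals phase-2 search over phase-1 regions
theorem goB_eq_search (n : Int) (k : Nat) (xs : List String) (hk : xs.length = k)
    (idx : Int) (Rpre : List (Int × Int))
    (hpre : ∀ p ∈ Rpre, p.2 < idx) (hidx : idx + (xs.length : Int) = n) :
    fheSearch n (Rpre ++ fheRegions n xs idx) xs idx = fheGoB n xs idx := by
  induction k using Nat.strong_induction_on generalizing xs idx Rpre with
  | _ k ih =>
    match xs, hk with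
    | [], _ => simp [fheSearch, fheGoB]
    | l :: rest, hk =>
      have hrest : rest.length < k := by simp at hk; omega
      have hidx' : (idx + 1) + (rest.length : Int) = n := by simp at hidx ⊢; omega
      by_cases h1 : PySem.Str.lstrip l = ""
      · have hr : fheRegions n (l :: rest) idx = fheRegions n rest (idx + 1) := by
          rw [fheRegions, if_neg (by rw [h1]; decide)]
        rw [hr, fheSearch, if_neg (by simp [h1]), fheGoB]
        simp only [h1, if_true]
        exact ih rest.length hrest rest rfl (idx + 1) Rpre
          (fun p hp => by have := hpre p hp; omega) hidx'
      · by_cases h2 : PySem.Str.startswith (PySem.Str.lstrip l) ";" = true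
        · have h2' := startswith_semi_not_slashstar _ h2
          have hr : fheRegions n (l :: rest) idx = fheRegions n rest (idx + 1) := by
            rw [fheRegions, if_neg (by simpa using h2')]
          rw [hr, fheSearch, if_neg (fun hc => by rw [h2] at hc; simp at hc), fheGoB]
          simp only [h1, h2, if_true, if_false]
          exact ih rest.length hrest rest rfl (idx + 1) Rpre
            (fun p hp => by have := hpre p hp; omega) hidx'
        · rw [Bool.not_eq_true] at h2
          by_cases h3 : PySem.Str.startswith (PySem.Str.lstrip l) "/*" = true
          · rw [fheGoB]
            simp only [h1, h2, h3, Bool.false_eq_true, if_false, if_true]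
            rw [fheRegions, if_pos h3]
            split
            · rename_i hskip
              -- unterminated: region (idx, n) covers every remaining index
              exact fheSearch_all_covered n _ idx n (by simp) (l :: rest) idx (by omega)
                (by simp at hidx ⊢; omega)
            · rename_i r j hskip
              have hij : idx + 1 ≤ j := fheSkip_ge hskip
              have hcov : fheCovered (Rpre ++ (idx, j) :: fheRegions n r (j + 1)) idx = true := by
                simp only [fheCovered, List.any_eq_true]
                exact ⟨(idx, j), by simp, by simp; omega⟩
              rw [fheSearch, if_neg (fun hc => by rw [hcov] at hc; simp at hc)]
              rw [fheSearch_skip n _ idx j (by simp) rest (idx + 1) r j hskip (by omega) le_rfl]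
              have hassoc : Rpre ++ (idx, j) :: fheRegions n r (j + 1)
                  = (Rpre ++ [((idx : Int), j)]) ++ fheRegions n r (j + 1) := by simp
              rw [hassoc]
              have hlen := fheSkip_length hskip
              have hleneq := fheSkip_len_eq hskip
              exact ih r.length (Nat.lt_trans hlen hrest) r rfl (j + 1)
                (Rpre ++ [((idx : Int), j)])
                (fun p hp => by
                  rcases List.mem_append.mp hp with h | h
                  · have := hpre p h; omega
                  · simp at h; subst h; simp)
                (by omega)
          · rw [Bool.not_eq_true] at h3
            have hr : fheRegions n (l :: rest) idx = fheRegions n rest (idx + 1) := by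
              rw [fheRegions, if_neg (by simpa using h3)]
            by_cases h4 : PySem.Str.startswith (PySem.Str.lstrip l) "#" = true
            · rw [hr, fheSearch, if_neg (fun hc => by rw [h4] at hc; simp at hc), fheGoB]
              simp only [h1, h2, h3, h4, Bool.false_eq_true, if_false, if_true]
              exact ih rest.length hrest rest rfl (idx + 1) Rpre
                (fun p hp => by have := hpre p hp; omega) hidx'
            · rw [Bool.not_eq_true] at h4
              -- code line: show it is not covered by any region
              have hcov : fheCovered (Rpre ++ fheRegions n rest (idx + 1)) idx = false := by
                simp only [fheCovered, List.any_eq_false]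
                intro p hp
                rcases List.mem_append.mp hp with h | h
                · have := hpre p h; simp; omega
                · have := fheRegions_lb n rest.length rest rfl (idx + 1) p h
                  simp; omega
              rw [hr, fheSearch, if_pos (by exact ⟨h1, h2, h4, h3, hcov⟩), fheGoB]
              simp only [h1, h2, h3, h4, Bool.false_eq_true, if_false]

-- ===== VERDICT (by name: the statement is the Claim_ definition above) =====
theorem find_header_end_spec : Claim_equal_find_header_end := by
  intro lines _
  unfold Spec_find_header_end find_header_end find_header_end_alt
  rw [goA_eq_goB _ lines.length lines rfl 0]
  exact (goB_eq_search _ lines.length lines rfl 0 [] (by simp) (by simp)).symm
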